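-- pv_equiv track=rewrite | github.com/desy-fsec/sardana-macros | DESY_general/nxsmacros.py | orderedKeys
-- ===== SOURCE A (Python) =====
-- def orderedKeys(lst):
--     """ Find headers """
--     dorder = ["source_name", "source_type", "source", "nexus_type", "shape"]
--     headers = set()
--     for dct in lst:
--         for k in dct.keys():
--             headers.add(k)
--     ikeys = list(headers)
--     if ikeys:
--         okeys = [k for k in dorder if k in ikeys]
--         okeys.extend(list(sorted(set(ikeys) - set(okeys))))
--     else:
--         okeys = []
--     return okeys
-- ===== SOURCE B (Python) =====
-- def orderedKeys(lst):
--     """ Find headers """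
--     dorder = ["source_name", "source_type", "source", "nexus_type", "shape"]
--     headers = set()
--     for dct in lst:
--         headers.update(dct.keys())
--     return sorted(headers,
--                   key=lambda k: (dorder.index(k) if k in dorder else len(dorder), k))
-- ===== Notes on version B (the rewrite author's own statement) =====
-- stated objective: simpler
-- what changed: Instead of filtering the priority list, taking a set difference, sorting the remainder and concatenating, B does one keyed sort over the union of keys with the composite key (priority rank or len(dorder), name).
import Mathlib
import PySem

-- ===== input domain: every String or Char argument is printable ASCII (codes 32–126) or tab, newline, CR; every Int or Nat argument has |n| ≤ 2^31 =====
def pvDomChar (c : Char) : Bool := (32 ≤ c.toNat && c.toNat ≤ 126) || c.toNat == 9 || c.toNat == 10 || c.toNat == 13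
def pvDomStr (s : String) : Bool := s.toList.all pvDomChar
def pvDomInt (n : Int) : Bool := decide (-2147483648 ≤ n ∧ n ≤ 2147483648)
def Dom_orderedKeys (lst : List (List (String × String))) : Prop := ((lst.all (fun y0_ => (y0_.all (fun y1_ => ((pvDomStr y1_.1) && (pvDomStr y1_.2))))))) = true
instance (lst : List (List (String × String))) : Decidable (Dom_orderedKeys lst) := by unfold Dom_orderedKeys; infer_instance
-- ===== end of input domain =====

-- B replaces A's filter-then-set-difference-then-sort-then-concatenate with ONE keyed sort
-- over the union of keys (key = (priority rank, name)); objective: simpler.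

-- the priority order, shared by both programs (A's and B's local `dorder`)
def pvDorder : List String := ["source_name", "source_type", "source", "nexus_type", "shape"]

-- ===== PORT A =====
def orderedKeys (lst : List (List (String × String))) : List String :=
  let headers : PySem.Set String :=
    lst.foldl (fun h dct => (PySem.Dict.keys ⟨dct⟩).foldl PySem.Set.add h) PySem.Set.empty
  let ikeys : List String := headers
  if ikeys ≠ [] then
    let okeys := pvDorder.filter (fun k => ikeys.contains k)
    okeys ++ PySem.List.sorted ((PySem.Set.ofList ikeys).diff (PySem.Set.ofList okeys)) (fun x => x) false
  else
    []

-- ===== PORT B =====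
-- B's key lambda: `dorder.index(k) if k in dorder else len(dorder)`
def pvRank (k : String) : Int :=
  if pvDorder.contains k then (((PySem.List.index? pvDorder k).getD 0 : Nat) : Int)
  else PySem.List.len pvDorder

def orderedKeys_alt (lst : List (List (String × String))) : List String :=
  let headers : PySem.Set String :=
    lst.foldl (fun h dct => PySem.Set.update h (PySem.Dict.keys ⟨dct⟩)) PySem.Set.empty
  PySem.List.sorted2 headers pvRank (fun k => k) false

-- ===== PRECONDITION & SPEC =====
def Spec_orderedKeys (lst : List (List (String × String))) (out : List String) : Prop := out = orderedKeys_alt lst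
instance (lst : List (List (String × String))) (out : List String) : Decidable (Spec_orderedKeys lst out) := by unfold Spec_orderedKeys; infer_instance

-- ===== CLAIM (what is proved, stated in full; the proofs are below) =====
def Claim_equal_orderedKeys : Prop := ∀ (lst : List (List (String × String))), Dom_orderedKeys lst → Spec_orderedKeys lst (orderedKeys lst)

-- ===== LEMMAS AND PROOFS =====

-- sorted2 with second key = identity IS sorted with the lexicographic pair key
theorem pv_sorted2_eq_sorted_lex (xs : List String) (k1 : String → Int) :
    PySem.List.sorted2 xs k1 (fun x => x) false
      = PySem.List.sorted xs (fun x => toLex (k1 x, x)) false := by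
  rw [PySem.List.sorted_eq_foldl_insertBy]
  have hpred : (fun a b : String => decide (k1 a < k1 b) || (!decide (k1 b < k1 a) && decide (a < b)))
      = (fun a b : String => decide (toLex (k1 a, a) < toLex (k1 b, b))) := by
    funext a b
    rcases lt_trichotomy (k1 a) (k1 b) with h | h | h
    · simp [Prod.Lex.toLex_lt_toLex, h]
    · simp [Prod.Lex.toLex_lt_toLex, h]
    · have h1 : ¬ k1 a < k1 b := not_lt_of_gt h
      have h2 : ¬ k1 a = k1 b := ne_of_gt h
      simp [Prod.Lex.toLex_lt_toLex, h, h1, h2]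
  simp only [PySem.List.sorted2, Bool.false_eq_true, if_false]
  rw [hpred]

-- sorted (id key) of a duplicate-free list is strictly increasing
theorem pv_sorted_id_nodup_pairwise_lt (xs : List String) (h : xs.Nodup) :
    (PySem.List.sorted xs (fun x => x) false).Pairwise (· < ·) := by
  have hp := PySem.List.sorted_pairwise xs (fun x => x)
  have hn : (PySem.List.sorted xs (fun x => x) false).Nodup :=
    (PySem.List.sorted_perm xs (fun x => x) false).nodup_iff.mpr h
  exact (hp.and hn).imp (fun hab => lt_of_le_of_ne hab.1 hab.2)

-- the union-of-keys accumulator stays duplicate-free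
theorem pv_headers_nodup (lst : List (List (String × String))) (acc : PySem.Set String)
    (h : acc.Nodup) :
    (lst.foldl (fun h dct => (PySem.Dict.keys ⟨dct⟩).foldl PySem.Set.add h) acc).Nodup := by
  induction lst generalizing acc with
  | nil => exact h
  | cons dct rest ih =>
      exact ih _ (PySem.Set.nodup_update acc (PySem.Dict.keys ⟨dct⟩) h)

theorem pv_rank_lt_of_mem {k : String} (h : k ∈ pvDorder) : pvRank k < 5 := by
  fin_cases h <;> decide

theorem pv_rank_of_not_mem {k : String} (h : k ∉ pvDorder) : pvRank k = 5 := by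
  simp [pvRank, h]
  rfl

theorem pv_dorder_pairwise_rank : pvDorder.Pairwise (fun a b => pvRank a < pvRank b) := by
  decide

-- the heart of the claim: A's concatenation is exactly B's single keyed sort
theorem pv_main (H : List String) (hH : H.Nodup) :
    (pvDorder.filter (fun k => H.contains k)) ++
        PySem.List.sorted
          ((PySem.Set.ofList H).diff (PySem.Set.ofList (pvDorder.filter (fun k => H.contains k))))
          (fun x => x) false
      = PySem.List.sorted2 H pvRank (fun k => k) false := by
  set F := pvDorder.filter (fun k => H.contains k) with hF
  set S := PySem.List.sorted ((PySem.Set.ofList H).diff (PySem.Set.ofList F)) (fun x => x) false with hS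
  have hmemF : ∀ a, a ∈ F ↔ a ∈ pvDorder ∧ a ∈ H := by
    intro a
    simp [hF, List.mem_filter]
  have hmemS : ∀ a, a ∈ S ↔ a ∈ H ∧ a ∉ F := by
    intro a
    rw [hS, PySem.List.mem_sorted, PySem.Set.mem_diff, PySem.Set.mem_ofList, PySem.Set.mem_ofList]
  have hSnotd : ∀ a ∈ S, a ∉ pvDorder := by
    intro a ha had
    rcases (hmemS a).mp ha with ⟨haH, haF⟩
    exact haF ((hmemF a).mpr ⟨had, haH⟩)
  have hFnodup : F.Nodup := (by decide : pvDorder.Nodup).filter _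
  have hSnodup : S.Nodup := by
    rw [hS]
    exact (PySem.List.sorted_perm _ _ _).nodup_iff.mpr
      (PySem.Set.nodup_diff _ _ (PySem.Set.nodup_ofList H))
  rw [pv_sorted2_eq_sorted_lex]
  refine (PySem.List.sorted_eq_of_perm_of_pairwise_lt _ _ _ ?_ ?_).symm
  · -- (F ++ S).Perm H
    rw [List.perm_ext_iff_of_nodup (List.Nodup.append hFnodup hSnodup ?_) hH]
    · intro a
      rw [List.mem_append, hmemF a, hmemS a]
      constructor
      · rintro (⟨_, h⟩ | ⟨h, _⟩) <;> exact h
      · intro haH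
        by_cases hd : a ∈ pvDorder
        · exact Or.inl ⟨hd, haH⟩
        · exact Or.inr ⟨haH, fun hf => hd ((hmemF a).mp hf).1⟩
    · intro a haF haS
      exact ((hmemS a).mp haS).2 haF
  · -- strictly increasing in the lex key
    rw [List.pairwise_append]
    refine ⟨?_, ?_, ?_⟩
    · exact (pv_dorder_pairwise_rank.filter _).imp
        (fun h => Prod.Lex.toLex_lt_toLex.mpr (Or.inl h))
    · rw [hS]
      refine List.Pairwise.imp_of_mem ?_
        (pv_sorted_id_nodup_pairwise_lt _ (PySem.Set.nodup_diff _ _ (PySem.Set.nodup_ofList H)))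
      intro a b ha hb hab
      rw [← hS] at ha hb
      refine Prod.Lex.toLex_lt_toLex.mpr (Or.inr ⟨?_, hab⟩)
      rw [pv_rank_of_not_mem (hSnotd a ha), pv_rank_of_not_mem (hSnotd b hb)]
    · intro a haF b hbS
      apply Prod.Lex.toLex_lt_toLex.mpr
      left
      have h1 : pvRank a < 5 := pv_rank_lt_of_mem ((hmemF a).mp haF).1
      have h2 : pvRank b = 5 := pv_rank_of_not_mem (hSnotd b hbS)
      omega

-- ===== VERDICT (by name: the statement is the Claim_ definition above) =====
theorem orderedKeys_spec : Claim_equal_orderedKeys := by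
  intro lst _
  unfold Spec_orderedKeys orderedKeys orderedKeys_alt
  simp only []
  set H : PySem.Set String :=
    lst.foldl (fun h dct => (PySem.Dict.keys ⟨dct⟩).foldl PySem.Set.add h) PySem.Set.empty with hHdef
  have hupd : lst.foldl (fun h dct => PySem.Set.update h (PySem.Dict.keys ⟨dct⟩)) PySem.Set.empty = H := rfl
  rw [hupd]
  have hH : H.Nodup := pv_headers_nodup lst PySem.Set.empty (by decide)
  by_cases hnil : H = []
  · rw [hnil]
    rfl
  · rw [if_pos hnil]
    exact pv_main H hH
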